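-- pv_equiv track=rewrite | github.com/AS2009/tinygrad-manager | TinyGradManager/env_checker.py | _is_apple_gpu_device
-- ===== SOURCE A (Python) =====
-- def _is_apple_gpu_device(device_name_upper: str) -> bool:
--     """Check if a tinygrad device name represents an Apple GPU (Metal/ANE)."""
--     apple_devices = {"METAL", "GPU", "ANE"}
--     # Exact match for short names like "METAL", "GPU", "ANE"
--     if device_name_upper in apple_devices:
--         return True
--     # Prefix match for names like "METAL:0", "METAL:1", "ANE:0"
--     for prefix in apple_devices:
--         if device_name_upper.startswith(prefix + ":") or device_name_upper.startswith(prefix + "|"):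
--             return True
--     return False
-- ===== SOURCE B (Python) =====
-- def _is_apple_gpu_device(device_name_upper: str) -> bool:
--     """Check if a tinygrad device name represents an Apple GPU (Metal/ANE)."""
--     # Take the leading token (everything before the first ':' or '|'), then one lookup.
--     token_chars = []
--     for ch in device_name_upper:
--         if ch == ':' or ch == '|':
--             break
--         token_chars.append(ch)
--     return ''.join(token_chars) in ("METAL", "GPU", "ANE")
-- ===== Notes on version B (the rewrite author's own statement) =====
-- stated objective: simpler
-- what changed: Replaces the exact-match test plus the loop over candidate prefixes (startswith prefix+':' / prefix+'|') by a single scan that extracts the leading token before the first ':' or '|' and one membership lookup of that token.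
import Mathlib
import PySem

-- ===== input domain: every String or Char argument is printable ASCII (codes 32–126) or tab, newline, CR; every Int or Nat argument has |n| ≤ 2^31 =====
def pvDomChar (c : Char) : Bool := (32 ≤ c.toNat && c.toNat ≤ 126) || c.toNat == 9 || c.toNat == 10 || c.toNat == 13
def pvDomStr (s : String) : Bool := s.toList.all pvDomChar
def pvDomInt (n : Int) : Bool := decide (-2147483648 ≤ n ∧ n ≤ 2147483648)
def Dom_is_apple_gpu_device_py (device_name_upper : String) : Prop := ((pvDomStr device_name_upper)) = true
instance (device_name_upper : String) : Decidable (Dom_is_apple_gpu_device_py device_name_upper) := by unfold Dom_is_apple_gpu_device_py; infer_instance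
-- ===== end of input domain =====

-- B replaces the exact-match test plus the prefix loop by extracting the leading
-- token before the first ':' or '|' and one membership lookup (objective: simpler).

-- ===== PORT A =====
def is_apple_gpu_device_py (device_name_upper : String) : Bool :=
  let apple_devices : List String := ["METAL", "GPU", "ANE"]
  if apple_devices.contains device_name_upper then true
  else
    apple_devices.any (fun prefix_ =>
      PySem.Str.startswith device_name_upper (prefix_ ++ ":") ||
      PySem.Str.startswith device_name_upper (prefix_ ++ "|"))

-- ===== PORT B =====
-- the for-loop of Source B that accumulates chars until the first ':' or '|' (break)
def pvTakeToken : List Char → List Char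
  | [] => []
  | c :: rest => if c == ':' || c == '|' then [] else c :: pvTakeToken rest

def is_apple_gpu_device_py_alt (device_name_upper : String) : Bool :=
  (["METAL", "GPU", "ANE"] : List String).contains (String.ofList (pvTakeToken device_name_upper.toList))

-- ===== PRECONDITION & SPEC =====
def Spec_is_apple_gpu_device_py (device_name_upper : String) (out : Bool) : Prop := out = is_apple_gpu_device_py_alt device_name_upper
instance (device_name_upper : String) (out : Bool) : Decidable (Spec_is_apple_gpu_device_py device_name_upper out) := by unfold Spec_is_apple_gpu_device_py; infer_instance

-- ===== CLAIM (what is proved, stated in full; the proofs are below) =====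
def Claim_equal_is_apple_gpu_device_py : Prop := ∀ (device_name_upper : String), Dom_is_apple_gpu_device_py device_name_upper → Spec_is_apple_gpu_device_py device_name_upper (is_apple_gpu_device_py device_name_upper)

-- ===== LEMMAS AND PROOFS =====

-- For a delimiter-free word p: "s equals p, or p+':' / p+'|' is a prefix of s"
-- is exactly "the leading token of s is p".
theorem pvTakeToken_key (s p : List Char) (hp : ∀ c ∈ p, c ≠ ':' ∧ c ≠ '|') :
    (s = p ∨ (p ++ [':']) <+: s ∨ (p ++ ['|']) <+: s) ↔ pvTakeToken s = p := by
  induction s generalizing p with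
  | nil =>
      constructor
      · rintro (h | h | h)
        · exact h
        · simp at h
        · simp at h
      · intro h; exact Or.inl h
  | cons c s' ih =>
      by_cases hc : c = ':' ∨ c = '|'
      · have htok : pvTakeToken (c :: s') = [] := by
          rcases hc with h | h <;> simp [pvTakeToken, h]
        rw [htok]
        cases p with
        | nil =>
            constructor
            · intro _; rfl
            · intro _
              rcases hc with h | h <;> subst h
              · exact Or.inr (Or.inl ⟨s', rfl⟩)
              · exact Or.inr (Or.inr ⟨s', rfl⟩)
        | cons q qs =>
            have hq := hp q (by simp)
            constructor
            · rintro (h | h | h)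
              · injection h with h1 _
                rcases hc with h2 | h2 <;> rw [h2] at h1
                · exact absurd h1.symm hq.1
                · exact absurd h1.symm hq.2
              · rw [List.cons_append, List.cons_prefix_cons] at h
                rcases h with ⟨h1, -⟩
                rcases hc with h2 | h2 <;> rw [h2] at h1
                · exact absurd h1 hq.1
                · exact absurd h1 hq.2
              · rw [List.cons_append, List.cons_prefix_cons] at h
                rcases h with ⟨h1, -⟩
                rcases hc with h2 | h2 <;> rw [h2] at h1
                · exact absurd h1 hq.1
                · exact absurd h1 hq.2
            · intro h; exact absurd h (by simp)
      · rw [not_or] at hc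
        have htok : pvTakeToken (c :: s') = c :: pvTakeToken s' := by
          simp [pvTakeToken, hc.1, hc.2]
        rw [htok]
        cases p with
        | nil =>
            constructor
            · rintro (h | h | h)
              · simp at h
              · rw [List.nil_append] at h
                rcases h with ⟨t, ht⟩
                injection ht with h1 _
                exact absurd h1.symm hc.1
              · rw [List.nil_append] at h
                rcases h with ⟨t, ht⟩
                injection ht with h1 _
                exact absurd h1.symm hc.2
            · intro h; exact absurd h (by simp)
        | cons q qs =>
            have hqs : ∀ x ∈ qs, x ≠ ':' ∧ x ≠ '|' := fun x hx => hp x (by simp [hx])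
            rw [List.cons_append, List.cons_append, List.cons_prefix_cons,
              List.cons_prefix_cons]
            constructor
            · rintro (h | h | h)
              · injection h with h1 h2
                subst h1
                have := (ih qs hqs).mp (Or.inl h2)
                simp [this]
              · rcases h with ⟨h1, h2⟩
                subst h1
                have := (ih qs hqs).mp (Or.inr (Or.inl h2))
                simp [this]
              · rcases h with ⟨h1, h2⟩
                subst h1
                have := (ih qs hqs).mp (Or.inr (Or.inr h2))
                simp [this]
            · intro h
              injection h with h1 h2
              subst h1
              rcases (ih qs hqs).mpr h2 with h | h | h
              · exact Or.inl (by rw [h])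
              · exact Or.inr (Or.inl ⟨rfl, h⟩)
              · exact Or.inr (Or.inr ⟨rfl, h⟩)

-- Bool-level corollary of pvTakeToken_key for the startswith primitive.
theorem pv_startswith_eq_decide (s p : List Char) :
    PySem.Chars.startswith s p = decide (p <+: s) := by
  by_cases h : p <+: s
  · simp [PySem.Chars.startswith_iff, h]
  · simp only [h, decide_false]
    rw [← Bool.not_eq_true, PySem.Chars.startswith_iff]
    exact h

-- ===== VERDICT (by name: the statement is the Claim_ definition above) =====
theorem is_apple_gpu_device_py_spec : Claim_equal_is_apple_gpu_device_py := by
  intro d _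
  unfold Spec_is_apple_gpu_device_py is_apple_gpu_device_py is_apple_gpu_device_py_alt
  have hM := pvTakeToken_key d.toList ['M','E','T','A','L']
    (by intro c hc; fin_cases hc <;> exact ⟨by decide, by decide⟩)
  have hG := pvTakeToken_key d.toList ['G','P','U']
    (by intro c hc; fin_cases hc <;> exact ⟨by decide, by decide⟩)
  have hA := pvTakeToken_key d.toList ['A','N','E']
    (by intro c hc; fin_cases hc <;> exact ⟨by decide, by decide⟩)
  have eM : String.ofList (pvTakeToken d.toList) = "METAL" ↔
      pvTakeToken d.toList = ['M','E','T','A','L'] := by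
    rw [← String.toList_inj, String.toList_ofList]; exact Iff.rfl
  have eG : String.ofList (pvTakeToken d.toList) = "GPU" ↔
      pvTakeToken d.toList = ['G','P','U'] := by
    rw [← String.toList_inj, String.toList_ofList]; exact Iff.rfl
  have eA : String.ofList (pvTakeToken d.toList) = "ANE" ↔
      pvTakeToken d.toList = ['A','N','E'] := by
    rw [← String.toList_inj, String.toList_ofList]; exact Iff.rfl
  have qM : (d = "METAL") ↔ d.toList = ['M','E','T','A','L'] := by
    rw [← String.toList_inj]; exact Iff.rfl
  have qG : (d = "GPU") ↔ d.toList = ['G','P','U'] := by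
    rw [← String.toList_inj]; exact Iff.rfl
  have qA : (d = "ANE") ↔ d.toList = ['A','N','E'] := by
    rw [← String.toList_inj]; exact Iff.rfl
  have t1 : ("METAL" ++ ":" : String).toList = ['M','E','T','A','L'] ++ [':'] := by decide
  have t2 : ("METAL" ++ "|" : String).toList = ['M','E','T','A','L'] ++ ['|'] := by decide
  have t3 : ("GPU" ++ ":" : String).toList = ['G','P','U'] ++ [':'] := by decide
  have t4 : ("GPU" ++ "|" : String).toList = ['G','P','U'] ++ ['|'] := by decide
  have t5 : ("ANE" ++ ":" : String).toList = ['A','N','E'] ++ [':'] := by decide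
  have t6 : ("ANE" ++ "|" : String).toList = ['A','N','E'] ++ ['|'] := by decide
  have hsplit : ∀ (c x : Bool),
      (if c then true else x) = (c || x) := by intro c x; cases c <;> simp
  rw [hsplit, Bool.eq_iff_iff]
  simp only [List.contains_cons, List.contains_nil, List.any_cons, List.any_nil,
    Bool.or_eq_true, Bool.or_false, beq_iff_eq, PySem.Str.startswith,
    pv_startswith_eq_decide, decide_eq_true_eq, t1, t2, t3, t4, t5, t6,
    eM, eG, eA, qM, qG, qA]
  constructor
  · rintro ((h | h | h) | (h | h) | (h | h) | (h | h))
    · exact Or.inl (hM.mp (Or.inl h))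
    · exact Or.inr (Or.inl (hG.mp (Or.inl h)))
    · exact Or.inr (Or.inr (hA.mp (Or.inl h)))
    · exact Or.inl (hM.mp (Or.inr (Or.inl h)))
    · exact Or.inl (hM.mp (Or.inr (Or.inr h)))
    · exact Or.inr (Or.inl (hG.mp (Or.inr (Or.inl h))))
    · exact Or.inr (Or.inl (hG.mp (Or.inr (Or.inr h))))
    · exact Or.inr (Or.inr (hA.mp (Or.inr (Or.inl h))))
    · exact Or.inr (Or.inr (hA.mp (Or.inr (Or.inr h))))
  · rintro (h | h | h)
    · rcases hM.mpr h with h1 | h1 | h1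
      · exact Or.inl (Or.inl h1)
      · exact Or.inr (Or.inl (Or.inl h1))
      · exact Or.inr (Or.inl (Or.inr h1))
    · rcases hG.mpr h with h1 | h1 | h1
      · exact Or.inl (Or.inr (Or.inl h1))
      · exact Or.inr (Or.inr (Or.inl (Or.inl h1)))
      · exact Or.inr (Or.inr (Or.inl (Or.inr h1)))
    · rcases hA.mpr h with h1 | h1 | h1
      · exact Or.inl (Or.inr (Or.inr h1))
      · exact Or.inr (Or.inr (Or.inr (Or.inl h1)))
      · exact Or.inr (Or.inr (Or.inr (Or.inr h1)))
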